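-- pv_equiv track=rewrite | github.com/miliar/Code_Jam_Webscraper | solutions_python/Problem_181/1035.py | solve
-- ===== SOURCE A (Python) =====
-- def solve(S):
--     ret = []
--     for s in S:
--         if s == '\n' or s == '\r':
--             continue
--         tmp1 = list(ret)
--         tmp1.append(s)
--         tmp2 = [s]
--         tmp2.extend(ret)
--         if tmp1 > tmp2:
--             ret = tmp1
--         else:
--             ret = tmp2
--     return ''.join(ret)
-- ===== SOURCE B (Python) =====
-- def solve(S):
--     # O(n): keep result as two lists (front reversed + back); decide append vs
--     # prepend from the first char and the first char after the leading run.
--     front = []      # prepended chars, most recent last (stored reversed)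
--     back = []       # appended chars, in order
--     front_c = None  # first char of the current result
--     nxt = None      # first char of the result that differs from front_c
--     for s in S:
--         if s == '\n' or s == '\r':
--             continue
--         if front_c is None:
--             back.append(s)
--             front_c = s
--         elif s > front_c:
--             front.append(s)
--             nxt = front_c
--             front_c = s
--         elif s < front_c:
--             back.append(s)
--             if nxt is None:
--                 nxt = s
--         elif nxt is not None and nxt > s:
--             back.append(s)
--         else:
--             front.append(s)
--     return ''.join(reversed(front)) + ''.join(back)
-- ===== Notes on version B (the rewrite author's own statement) =====
-- stated objective: faster
-- what changed: Replaces A's per-character O(n) list copies and lexicographic list comparison by O(1) append/prepend decisions on a two-list deque, driven by the first character and the first character after the leading run.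
import Mathlib
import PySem

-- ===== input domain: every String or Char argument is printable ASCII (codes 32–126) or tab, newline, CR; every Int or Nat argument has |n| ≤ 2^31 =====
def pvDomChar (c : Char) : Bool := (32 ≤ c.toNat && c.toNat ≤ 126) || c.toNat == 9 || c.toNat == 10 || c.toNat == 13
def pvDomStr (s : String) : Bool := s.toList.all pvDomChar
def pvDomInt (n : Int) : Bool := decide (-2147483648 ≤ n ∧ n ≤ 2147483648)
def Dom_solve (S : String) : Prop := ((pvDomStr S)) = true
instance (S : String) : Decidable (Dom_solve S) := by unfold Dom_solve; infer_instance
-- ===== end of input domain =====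

-- B replaces A's per-character O(n) list comparison/copy by O(1) decisions from the
-- first char and the first char after the leading run (objective: faster, O(n) vs O(n^2)).

-- ===== PORT A =====
-- Python's lexicographic `<` on lists of (single-character) strings
def listLt : List Char → List Char → Bool
  | _, [] => false
  | [], _ :: _ => true
  | a :: as, b :: bs => if a < b then true else if b < a then false else listLt as bs

def stepA (ret : List Char) (s : Char) : List Char :=
  if s = '\n' ∨ s = '\r' then ret
  else
    let tmp1 := ret ++ [s]
    let tmp2 := s :: ret
    if listLt tmp2 tmp1 then tmp1 else tmp2

def solve (S : String) : String :=
  String.mk (S.toList.foldl stepA [])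

-- ===== PORT B =====
-- state: (front (reversed), back, front_c, nxt)
def stepB (st : List Char × List Char × Option Char × Option Char) (s : Char) :
    List Char × List Char × Option Char × Option Char :=
  if s = '\n' ∨ s = '\r' then st
  else
    match st with
    | (front, back, none, nxt) => (front, back ++ [s], some s, nxt)
    | (front, back, some c, nxt) =>
      if c < s then (front ++ [s], back, some s, some c)
      else if s < c then (front, back ++ [s], some c, if nxt = none then some s else nxt)
      else
        match nxt with
        | some d => if s < d then (front, back ++ [s], some c, some d)
                    else (front ++ [s], back, some c, some d)
        | none => (front ++ [s], back, some c, none)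

def solve_alt (S : String) : String :=
  let st := S.toList.foldl stepB ([], [], none, none)
  String.mk (st.1.reverse ++ st.2.1)

-- ===== PRECONDITION & SPEC =====
def Spec_solve (S : String) (out : String) : Prop := out = solve_alt S
instance (S : String) (out : String) : Decidable (Spec_solve S out) := by unfold Spec_solve; infer_instance

-- ===== CLAIM (what is proved, stated in full; the proofs are below) =====
def Claim_equal_solve : Prop := ∀ (S : String), Dom_solve S → Spec_solve S (solve S)

-- ===== LEMMAS AND PROOFS =====

-- first element of l differing from c
def firstNe (c : Char) : List Char → Option Char
  | [] => none
  | d :: l => if d = c then firstNe c l else some d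

def nxtOf : List Char → Option Char
  | [] => none
  | c :: r => firstNe c (c :: r)

def InvAB (ret : List Char) (st : List Char × List Char × Option Char × Option Char) : Prop :=
  ret = st.1.reverse ++ st.2.1 ∧ st.2.2.1 = ret.head? ∧ st.2.2.2 = nxtOf ret

theorem firstNe_append_some {c d x : Char} {l : List Char} (h : firstNe c l = some d) :
    firstNe c (l ++ [x]) = some d := by
  induction l with
  | nil => simp [firstNe] at h
  | cons a l ih =>
    by_cases ha : a = c
    · simp [firstNe, ha] at h ⊢; exact ih h
    · simp [firstNe, ha] at h ⊢; exact h

theorem firstNe_append_none {c x : Char} {l : List Char} (h : firstNe c l = none)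
    (hx : x ≠ c) : firstNe c (l ++ [x]) = some x := by
  induction l with
  | nil => simp [firstNe, hx]
  | cons a l ih =>
    by_cases ha : a = c
    · simp [firstNe, ha] at h ⊢; exact ih h
    · simp [firstNe, ha] at h

-- key: comparing (c :: l) with (l ++ [c]) is decided by the first element of l differing from c
theorem listLt_rot (c : Char) (l : List Char) :
    listLt (c :: l) (l ++ [c]) =
      (match firstNe c l with | none => false | some d => decide (c < d)) := by
  induction l with
  | nil => simp [listLt, firstNe]
  | cons a l ih =>
    by_cases ha : a = c
    · subst ha
      simpa [listLt, firstNe] using ih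
    · rcases lt_trichotomy a c with h | h | h
      · simp [listLt, firstNe, ha, h, not_lt.mpr h.le]
      · exact absurd h ha
      · simp [listLt, firstNe, ha, h, not_lt.mpr h.le]

-- A's step, characterised by the first char and the first char after the leading run
theorem stepA_char (ret : List Char) (s : Char) (hs : ¬(s = '\n' ∨ s = '\r')) :
    stepA ret s = (match ret.head? with
      | none => [s]
      | some c =>
        if c < s then s :: ret
        else if s < c then ret ++ [s]
        else match nxtOf ret with
          | some d => if s < d then ret ++ [s] else s :: ret
          | none => s :: ret) := by
  cases ret with
  | nil => simp [stepA, hs, listLt]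
  | cons c r =>
    simp only [stepA, hs, if_false, List.head?_cons]
    rcases lt_trichotomy c s with h | h | h
    · have hlt : listLt (s :: c :: r) (c :: (r ++ [s])) = false := by
        simp [listLt, h, not_lt.mpr h.le]
      simp [hlt, h]
    · subst h
      have hkey := listLt_rot c (c :: r)
      simp only [List.cons_append] at hkey
      cases hd : firstNe c (c :: r) with
      | none => rw [hd] at hkey; simp [hkey, nxtOf, hd, lt_irrefl]
      | some d =>
        rw [hd] at hkey
        by_cases hsd : c < d
        · simp [hkey, nxtOf, hd, hsd, lt_irrefl]
        · simp [hkey, nxtOf, hd, hsd, lt_irrefl]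
    · have hlt : listLt (s :: c :: r) (c :: (r ++ [s])) = true := by simp [listLt, h]
      simp [hlt, h, not_lt.mpr h.le]

theorem stepInvAB (ret : List Char) (st : List Char × List Char × Option Char × Option Char)
    (s : Char) (h : InvAB ret st) : InvAB (stepA ret s) (stepB st s) := by
  obtain ⟨front, back, fc, nx⟩ := st
  obtain ⟨h1, h2, h3⟩ := h
  simp only at h1 h2 h3
  by_cases hs : s = '\n' ∨ s = '\r'
  · simpa [stepA, stepB, hs] using ⟨h1, h2, h3⟩
  · rw [stepA_char ret s hs]
    cases ret with
    | nil =>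
      have hab : front.reverse = [] ∧ back = [] := List.append_eq_nil_iff.mp h1.symm
      have hf1 : front = [] := by simpa using hab.1
      have hf2 : back = [] := hab.2
      have hfc : fc = none := by simpa using h2
      have hnx : nx = none := by simpa [nxtOf] using h3
      subst hf1 hf2 hfc hnx
      exact ⟨by simp [stepB, hs], by simp [stepB, hs], by simp [stepB, hs, nxtOf, firstNe]⟩
    | cons c r =>
      have hfc : fc = some c := by simpa using h2
      subst hfc
      have hnx : nx = firstNe c r := by simpa [nxtOf, firstNe] using h3
      have hn : nxtOf (c :: r) = firstNe c r := by simp [nxtOf, firstNe]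
      simp only [List.head?_cons]
      rcases lt_trichotomy c s with h | h | h
      · -- prepend with a new, larger first char
        have hB : stepB (front, back, some c, nx) s = (front ++ [s], back, some s, some c) := by
          simp [stepB, hs, h]
        rw [if_pos h, hB]
        refine ⟨?_, by simp, ?_⟩
        · simp [h1]
        · simp [nxtOf, firstNe, h.ne]
      · -- equal first char: decided by the char after the leading run
        subst h
        rw [if_neg (lt_irrefl c), if_neg (lt_irrefl c), hn]
        cases hd : firstNe c r with
        | none =>
          have hB : stepB (front, back, some c, nx) c = (front ++ [c], back, some c, nx) := by
            simp [stepB, hs, hnx, hd]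
          rw [hB]
          exact ⟨by simp [h1], by simp, by simp [nxtOf, firstNe, hnx, hd]⟩
        | some d =>
          show InvAB (if c < d then (c :: r) ++ [c] else c :: (c :: r))
            (stepB (front, back, some c, nx) c)
          by_cases hsd : c < d
          · have hB : stepB (front, back, some c, nx) c = (front, back ++ [c], some c, some d) := by
              simp [stepB, hs, hnx, hd, hsd]
            rw [if_pos hsd, hB]
            refine ⟨?_, by simp, ?_⟩
            · rw [← List.append_assoc, ← h1]
            · simp [nxtOf, firstNe, firstNe_append_some hd]
          · have hB : stepB (front, back, some c, nx) c = (front ++ [c], back, some c, some d) := by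
              simp [stepB, hs, hnx, hd, hsd]
            rw [if_neg hsd, hB]
            exact ⟨by simp [h1], by simp, by simp [nxtOf, firstNe, hd]⟩
      · -- append a smaller char at the end
        have hB : stepB (front, back, some c, nx) s =
            (front, back ++ [s], some c, if nx = none then some s else nx) := by
          simp [stepB, hs, h, not_lt.mpr h.le]
        rw [if_neg (lt_asymm h), if_pos h, hB]
        refine ⟨?_, by simp, ?_⟩
        · rw [← List.append_assoc, ← h1]
        · cases hd : firstNe c r with
          | none =>
            simp [hnx, hd, nxtOf, firstNe, firstNe_append_none hd (ne_of_lt h)]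
          | some d =>
            simp [hnx, hd, nxtOf, firstNe, firstNe_append_some hd]

theorem foldInvAB (L : List Char) (ret : List Char)
    (st : List Char × List Char × Option Char × Option Char) (h : InvAB ret st) :
    InvAB (L.foldl stepA ret) (L.foldl stepB st) := by
  induction L generalizing ret st with
  | nil => exact h
  | cons a L ih => exact ih _ _ (stepInvAB _ _ _ h)

-- ===== VERDICT (by name: the statement is the Claim_ definition above) =====
theorem solve_spec : Claim_equal_solve := by
  intro S _
  unfold Spec_solve solve solve_alt
  have h := foldInvAB S.toList [] ([], [], none, none) (by simp [InvAB, nxtOf])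
  simpa using congrArg String.mk h.1
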